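-- pv_equiv track=rewrite | github.com/miliar/Code_Jam_Webscraper | solutions_python/Problem_202/96.py | xfill
-- ===== SOURCE A (Python) =====
-- def xfill(xboard):
--   n = len(xboard)
--   rowset = set()
--   colset = set()
--   for row in range(n):
--     for col in range(n):
--       if xboard[row][col]:
--         rowset |= set([row])
--         colset |= set([col])
--   fillboard = [[False] * n for i in range(n)]
--   for row in range(n):
--     for col in range(n):
--       if row not in rowset and col not in colset:
--         fillboard[row][col] = True
--         rowset |= set([row])
--         colset |= set([col])
--   return fillboard
-- ===== SOURCE B (Python) =====
-- def xfill(xboard):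
--     n = len(xboard)
--     occ_row = [any(xboard[r][c] for c in range(n)) for r in range(n)]
--     occ_col = [any(xboard[r][c] for r in range(n)) for c in range(n)]
--     free_rows = [r for r in range(n) if not occ_row[r]]
--     free_cols = [c for c in range(n) if not occ_col[c]]
--     board = [[False] * n for _ in range(n)]
--     for r, c in zip(free_rows, free_cols):
--         board[r][c] = True
--     return board
-- ===== Notes on version B (the rewrite author's own statement) =====
-- stated objective: simpler
-- what changed: Replaces the second full n*n cell scan that mutates rowset/colset cell by cell with a direct pairing: compute occupied-row/column flags, list the free row and free column indices, and set board[r][c]=True for each (r,c) in zip(free_rows, free_cols) (zip truncation reproduces A's greedy pairing exactly).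
import Mathlib
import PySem

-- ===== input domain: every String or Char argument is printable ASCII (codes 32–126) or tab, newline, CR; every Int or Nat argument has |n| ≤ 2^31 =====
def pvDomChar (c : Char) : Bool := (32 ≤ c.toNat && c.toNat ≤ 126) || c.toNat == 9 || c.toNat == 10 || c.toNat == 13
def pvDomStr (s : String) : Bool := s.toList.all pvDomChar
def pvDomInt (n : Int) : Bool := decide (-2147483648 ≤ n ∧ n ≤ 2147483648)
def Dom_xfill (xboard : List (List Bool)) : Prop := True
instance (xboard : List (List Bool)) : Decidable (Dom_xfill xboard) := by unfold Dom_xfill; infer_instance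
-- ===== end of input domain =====

-- B replaces A's second full-board scan (mutating row/col sets cell by cell) with a direct
-- zip-pairing of the precomputed free-row and free-column index lists (objective: simpler).

-- ===== PORT A =====
def xfill (xboard : List (List Bool)) : List (List Bool) :=
  let n : Int := xboard.length
  let rc :=
    (PySem.List.pyRange 0 n 1).foldl (fun rc row =>
      (PySem.List.pyRange 0 n 1).foldl (fun (rc : PySem.Set Int × PySem.Set Int) col =>
        if PySem.List.pyGetD (PySem.List.pyGetD xboard row []) col false then
          (PySem.Set.union rc.1 (PySem.Set.ofList [row]), PySem.Set.union rc.2 (PySem.Set.ofList [col]))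
        else rc) rc)
      ((PySem.Set.empty : PySem.Set Int), (PySem.Set.empty : PySem.Set Int))
  let fillboard : List (List Bool) := (PySem.List.pyRange 0 n 1).map (fun _ => List.replicate n.toNat false)
  let st :=
    (PySem.List.pyRange 0 n 1).foldl (fun st row =>
      (PySem.List.pyRange 0 n 1).foldl (fun (st : List (List Bool) × PySem.Set Int × PySem.Set Int) col =>
        if !(PySem.Set.contains st.2.1 row) && !(PySem.Set.contains st.2.2 col) then
          (PySem.List.pySetD st.1 row (PySem.List.pySetD (PySem.List.pyGetD st.1 row []) col true),
           PySem.Set.union st.2.1 (PySem.Set.ofList [row]), PySem.Set.union st.2.2 (PySem.Set.ofList [col]))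
        else st) st)
      (fillboard, rc.1, rc.2)
  st.1


-- ===== PORT B =====
def xfill_alt (xboard : List (List Bool)) : List (List Bool) :=
  let n : Int := xboard.length
  let occRow : List Bool := (PySem.List.pyRange 0 n 1).map (fun r =>
    (PySem.List.pyRange 0 n 1).any (fun c => PySem.List.pyGetD (PySem.List.pyGetD xboard r []) c false))
  let occCol : List Bool := (PySem.List.pyRange 0 n 1).map (fun c =>
    (PySem.List.pyRange 0 n 1).any (fun r => PySem.List.pyGetD (PySem.List.pyGetD xboard r []) c false))
  let freeRows := (PySem.List.pyRange 0 n 1).filter (fun r => !(PySem.List.pyGetD occRow r false))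
  let freeCols := (PySem.List.pyRange 0 n 1).filter (fun c => !(PySem.List.pyGetD occCol c false))
  let board : List (List Bool) := (PySem.List.pyRange 0 n 1).map (fun _ => List.replicate n.toNat false)
  (freeRows.zip freeCols).foldl (fun b p =>
    PySem.List.pySetD b p.1 (PySem.List.pySetD (PySem.List.pyGetD b p.1 []) p.2 true)) board



-- ===== PRECONDITION & SPEC =====
-- Pre_ excludes exactly the ragged boards on which Python A raises IndexError
-- (a row shorter than len(xboard)); A returns normally on every other input.
def Pre_xfill (xboard : List (List Bool)) : Prop :=
  ∀ row ∈ xboard, xboard.length ≤ row.length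
instance (xboard : List (List Bool)) : Decidable (Pre_xfill xboard) := by
  unfold Pre_xfill; infer_instance

def pvWitness_xfill : List (List Bool) := [[false, true], [false, false]]

def Spec_xfill (xboard : List (List Bool)) (out : List (List Bool)) : Prop := out = xfill_alt xboard
instance (xboard : List (List Bool)) (out : List (List Bool)) : Decidable (Spec_xfill xboard out) := by unfold Spec_xfill; infer_instance

-- ===== CLAIM (what is proved, stated in full; the proofs are below) =====
def Claim_equal_xfill : Prop := ∀ (xboard : List (List Bool)), Dom_xfill xboard → Pre_xfill xboard → Spec_xfill xboard (xfill xboard)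

-- ===== LEMMAS AND PROOFS =====
theorem pv_contains_eq (s : List Int) (x : Int) :
    PySem.Set.contains s x = decide (x ∈ s) := by
  by_cases hx : x ∈ s
  · simp [hx]
  · cases h : PySem.Set.contains s x
    · simp [hx]
    · exact absurd ((PySem.Set.contains_iff s x).mp h) hx

def p1in (g : Int → Int → Bool) (row : Int) (cols : List Int)
    (rc : PySem.Set Int × PySem.Set Int) : PySem.Set Int × PySem.Set Int :=
  cols.foldl (fun rc col =>
    if g row col then
      (PySem.Set.union rc.1 (PySem.Set.ofList [row]), PySem.Set.union rc.2 (PySem.Set.ofList [col]))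
    else rc) rc

theorem pv_p1in_mem (g : Int → Int → Bool) (row : Int) :
    ∀ (cols : List Int) (rc : PySem.Set Int × PySem.Set Int) (x y : Int),
    (x ∈ (p1in g row cols rc).1 ↔ x ∈ rc.1 ∨ (x = row ∧ ∃ c ∈ cols, g row c = true))
    ∧ (y ∈ (p1in g row cols rc).2 ↔ y ∈ rc.2 ∨ (y ∈ cols ∧ g row y = true)) := by
  intro cols
  induction cols with
  | nil => intro rc x y; simp [p1in]
  | cons c cs ih =>
    intro rc x y
    have hstep : p1in g row (c :: cs) rc = p1in g row cs
        (if g row c then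
          (PySem.Set.union rc.1 (PySem.Set.ofList [row]), PySem.Set.union rc.2 (PySem.Set.ofList [c]))
         else rc) := by simp [p1in]
    rw [hstep]
    by_cases h : g row c = true
    · rcases ih (PySem.Set.union rc.1 (PySem.Set.ofList [row]), PySem.Set.union rc.2 (PySem.Set.ofList [c])) x y with ⟨h1, h2⟩
      rw [if_pos h] at *
      refine ⟨?_, ?_⟩
      · rw [h1]; simp; try tauto
      · rw [h2]; simp
        constructor
        · rintro ((hy | rfl) | ⟨hy, hg⟩)
          · tauto
          · exact Or.inr ⟨Or.inl rfl, h⟩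
          · tauto
        · rintro (hy | ⟨(rfl | hy), hg⟩) <;> tauto
    · have h' : g row c = false := by simpa using h
      rcases ih rc x y with ⟨h1, h2⟩
      rw [if_neg h] at *
      refine ⟨?_, ?_⟩
      · rw [h1]; simp [h']; try tauto
      · rw [h2]; simp
        constructor
        · rintro (hy | ⟨hy, hg⟩) <;> tauto
        · rintro (hy | ⟨(rfl | hy), hg⟩) <;> tauto

def p1 (g : Int → Int → Bool) (rows cols : List Int)
    (rc : PySem.Set Int × PySem.Set Int) : PySem.Set Int × PySem.Set Int :=
  rows.foldl (fun rc row => p1in g row cols rc) rc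


theorem pv_p1_mem (g : Int → Int → Bool) (cols : List Int) :
    ∀ (rows : List Int) (rc : PySem.Set Int × PySem.Set Int) (x y : Int),
    (x ∈ (p1 g rows cols rc).1 ↔ x ∈ rc.1 ∨ (x ∈ rows ∧ ∃ c ∈ cols, g x c = true))
    ∧ (y ∈ (p1 g rows cols rc).2 ↔ y ∈ rc.2 ∨ (y ∈ cols ∧ ∃ r ∈ rows, g r y = true)) := by
  intro rows
  induction rows with
  | nil => intro rc x y; simp [p1]
  | cons r rs ih =>
    intro rc x y
    have hstep : p1 g (r :: rs) cols rc = p1 g rs cols (p1in g r cols rc) := by simp [p1]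
    rw [hstep]
    rcases ih (p1in g r cols rc) x y with ⟨h1, h2⟩
    rcases pv_p1in_mem g r cols rc x y with ⟨g1, g2⟩
    refine ⟨?_, ?_⟩
    · rw [h1, g1]
      simp only [List.mem_cons]
      constructor
      · rintro ((hx | ⟨rfl, hex⟩) | ⟨hx, hex⟩)
        · exact Or.inl hx
        · exact Or.inr ⟨Or.inl rfl, hex⟩
        · exact Or.inr ⟨Or.inr hx, hex⟩
      · rintro (hx | ⟨(rfl | hx), hex⟩)
        · exact Or.inl (Or.inl hx)
        · exact Or.inl (Or.inr ⟨rfl, hex⟩)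
        · exact Or.inr ⟨hx, hex⟩
    · rw [h2, g2]
      simp only [List.mem_cons]
      constructor
      · rintro ((hy | ⟨hy, hg⟩) | ⟨hy, hex⟩)
        · exact Or.inl hy
        · exact Or.inr ⟨hy, ⟨r, Or.inl rfl, hg⟩⟩
        · rcases hex with ⟨r', hr', hg⟩
          exact Or.inr ⟨hy, ⟨r', Or.inr hr', hg⟩⟩
      · rintro (hy | ⟨hy, ⟨r', hr' | hr', hg⟩⟩)
        · exact Or.inl (Or.inl hy)
        · exact Or.inl (Or.inr ⟨hy, hr' ▸ hg⟩)
        · exact Or.inr ⟨hy, ⟨r', hr', hg⟩⟩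

def pvSet (b : List (List Bool)) (r c : Int) : List (List Bool) :=
  PySem.List.pySetD b r (PySem.List.pySetD (PySem.List.pyGetD b r []) c true)

def p2in (row : Int) (cols : List Int)
    (st : List (List Bool) × PySem.Set Int × PySem.Set Int) :
    List (List Bool) × PySem.Set Int × PySem.Set Int :=
  cols.foldl (fun st col =>
    if !(PySem.Set.contains st.2.1 row) && !(PySem.Set.contains st.2.2 col) then
      (pvSet st.1 row col,
       PySem.Set.union st.2.1 (PySem.Set.ofList [row]), PySem.Set.union st.2.2 (PySem.Set.ofList [col]))
    else st) st

def p2 (rows cols : List Int)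
    (st : List (List Bool) × PySem.Set Int × PySem.Set Int) :
    List (List Bool) × PySem.Set Int × PySem.Set Int :=
  rows.foldl (fun st row => p2in row cols st) st

def zfill (b : List (List Bool)) (ps : List (Int × Int)) : List (List Bool) :=
  ps.foldl (fun b p => pvSet b p.1 p.2) b

theorem pv_p2in_done (row : Int) (cols : List Int)
    (st : List (List Bool) × PySem.Set Int × PySem.Set Int)
    (h : row ∈ st.2.1) : p2in row cols st = st := by
  induction cols with
  | nil => rfl
  | cons c cs ih =>
    have hstep : p2in row (c :: cs) st = p2in row cs
        (if !(PySem.Set.contains st.2.1 row) && !(PySem.Set.contains st.2.2 c) then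
          (pvSet st.1 row c,
           PySem.Set.union st.2.1 (PySem.Set.ofList [row]), PySem.Set.union st.2.2 (PySem.Set.ofList [c]))
         else st) := by simp [p2in]
    rw [hstep, if_neg (by simp [h]), ih]

theorem pv_p2in_eq (row : Int) (cols : List Int)
    (st : List (List Bool) × PySem.Set Int × PySem.Set Int)
    (h : row ∉ st.2.1) :
    p2in row cols st =
      match cols.find? (fun c => !(PySem.Set.contains st.2.2 c)) with
      | none => st
      | some c => (pvSet st.1 row c,
          PySem.Set.union st.2.1 (PySem.Set.ofList [row]),
          PySem.Set.union st.2.2 (PySem.Set.ofList [c])) := by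
  induction cols with
  | nil => rfl
  | cons c cs ih =>
    have hstep : p2in row (c :: cs) st = p2in row cs
        (if !(PySem.Set.contains st.2.1 row) && !(PySem.Set.contains st.2.2 c) then
          (pvSet st.1 row c,
           PySem.Set.union st.2.1 (PySem.Set.ofList [row]), PySem.Set.union st.2.2 (PySem.Set.ofList [c]))
         else st) := by simp [p2in]
    by_cases hc : c ∈ st.2.2
    · have hcond : (!(PySem.Set.contains st.2.1 row) && !(PySem.Set.contains st.2.2 c)) = false := by
        simp [hc]
      rw [hstep, if_neg (by rw [hcond]; simp)]
      rw [ih]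
      have : (List.find? (fun c => !(PySem.Set.contains st.2.2 c)) (c :: cs))
           = List.find? (fun c => !(PySem.Set.contains st.2.2 c)) cs := by
        rw [List.find?_cons_of_neg]
        simp [hc]
      rw [this]
    · have hcond : (!(PySem.Set.contains st.2.1 row) && !(PySem.Set.contains st.2.2 c)) = true := by
        simp [hc, h]
      rw [hstep, if_pos hcond]
      have hdone : p2in row cs
          (pvSet st.1 row c,
           PySem.Set.union st.2.1 (PySem.Set.ofList [row]), PySem.Set.union st.2.2 (PySem.Set.ofList [c]))
          = (pvSet st.1 row c,
           PySem.Set.union st.2.1 (PySem.Set.ofList [row]), PySem.Set.union st.2.2 (PySem.Set.ofList [c])) := by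
        apply pv_p2in_done
        simp
      rw [hdone]
      have : (List.find? (fun c => !(PySem.Set.contains st.2.2 c)) (c :: cs)) = some c := by
        rw [List.find?_cons_of_pos]
        simp [hc]
      rw [this]

theorem pv_filter_find (L : List Int) (p : Int → Bool) (c : Int)
    (hnd : L.Nodup) (hf : L.find? p = some c) :
    L.filter p = c :: L.filter (fun x => p x && !(x == c)) := by
  induction L with
  | nil => simp at hf
  | cons a L' ih =>
    rcases List.nodup_cons.mp hnd with ⟨ha, hnd'⟩
    by_cases hpa : p a = true
    · rw [List.find?_cons_of_pos hpa] at hf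
      have hca : c = a := by simpa using hf.symm
      subst hca
      rw [List.filter_cons_of_pos hpa]
      have : List.filter (fun x => p x && !(x == c)) (c :: L') = List.filter p L' := by
        rw [List.filter_cons_of_neg (by simp)]
        apply List.filter_congr
        intro x hx
        have : x ≠ c := fun hxc => ha (hxc ▸ hx)
        simp [this]
      rw [this]
    · have hpa' : p a = false := by simpa using hpa
      rw [List.find?_cons_of_neg (by simp [hpa']) ] at hf
      rw [List.filter_cons_of_neg (by simp [hpa']), List.filter_cons_of_neg (by simp [hpa']), ih hnd' hf]

theorem pv_p2_eq (cols : List Int) (hc : cols.Nodup) :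
    ∀ (rows : List Int), rows.Nodup →
    ∀ (st : List (List Bool) × PySem.Set Int × PySem.Set Int),
    (p2 rows cols st).1 =
      zfill st.1 ((rows.filter (fun r => !(PySem.Set.contains st.2.1 r))).zip
                  (cols.filter (fun c => !(PySem.Set.contains st.2.2 c)))) := by
  intro rows
  induction rows with
  | nil => intro _ st; simp [p2, zfill]
  | cons row rest ih =>
    intro hnd st
    rcases List.nodup_cons.mp hnd with ⟨hrow, hnd'⟩
    have hstep : p2 (row :: rest) cols st = p2 rest cols (p2in row cols st) := by simp [p2]
    rw [hstep]
    by_cases hr : row ∈ st.2.1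
    · rw [pv_p2in_done _ _ _ hr, ih hnd' st]
      have : List.filter (fun r => !(PySem.Set.contains st.2.1 r)) (row :: rest)
           = List.filter (fun r => !(PySem.Set.contains st.2.1 r)) rest := by
        rw [List.filter_cons_of_neg (by simp [hr])]
      rw [this]
    · rw [pv_p2in_eq _ _ _ hr]
      cases hf : cols.find? (fun c => !(PySem.Set.contains st.2.2 c)) with
      | none =>
        have hfc : cols.filter (fun c => !(PySem.Set.contains st.2.2 c)) = [] := by
          rw [List.filter_eq_nil_iff]
          intro c hcmem
          have := List.find?_eq_none.mp hf c hcmem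
          simp at this
          simp [this]
        rw [ih hnd' st, hfc]
        simp [zfill]
      | some c =>
        have hcc := List.find?_some hf
        have hcnot : c ∉ st.2.2 := by
          intro hmem
          rw [pv_contains_eq] at hcc
          simp [hmem] at hcc
        set st' := (pvSet st.1 row c,
          PySem.Set.union st.2.1 (PySem.Set.ofList [row]),
          PySem.Set.union st.2.2 (PySem.Set.ofList [c])) with hst'
        rw [ih hnd' st']
        have hRfilter : rest.filter (fun r => !(PySem.Set.contains st'.2.1 r))
            = rest.filter (fun r => !(PySem.Set.contains st.2.1 r)) := by
          apply List.filter_congr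
          intro r hrmem
          have hne : r ≠ row := fun h => hrow (h ▸ hrmem)
          simp [hst', hne]
        have hCfilter : cols.filter (fun x => !(PySem.Set.contains st'.2.2 x))
            = cols.filter (fun x => (!(PySem.Set.contains st.2.2 x)) && !(x == c)) := by
          apply List.filter_congr
          intro x hxmem
          by_cases hx : x ∈ st.2.2 <;> by_cases hxc : x = c <;>
            simp [hst', hx, hxc]
        have hsplit : cols.filter (fun x => !(PySem.Set.contains st.2.2 x))
            = c :: cols.filter (fun x => (!(PySem.Set.contains st.2.2 x)) && !(x == c)) :=
          pv_filter_find cols _ c hc hf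
        have hrfront : List.filter (fun r => !(PySem.Set.contains st.2.1 r)) (row :: rest)
            = row :: rest.filter (fun r => !(PySem.Set.contains st.2.1 r)) := by
          rw [List.filter_cons_of_pos (by simp [hr])]
        rw [hRfilter, hCfilter, hrfront, hsplit]
        simp [zfill, hst']

def pvG (xb : List (List Bool)) (r c : Int) : Bool :=
  PySem.List.pyGetD (PySem.List.pyGetD xb r []) c false

theorem xfill_eq (xb : List (List Bool)) : xfill xb = xfill_alt xb := by
  have hA : xfill xb = (p2 (PySem.List.pyRange 0 (xb.length : Int) 1) (PySem.List.pyRange 0 (xb.length : Int) 1)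
      (((PySem.List.pyRange 0 (xb.length : Int) 1).map (fun _ => List.replicate (xb.length : Int).toNat false)),
       (p1 (pvG xb) (PySem.List.pyRange 0 (xb.length : Int) 1) (PySem.List.pyRange 0 (xb.length : Int) 1) ([], [])).1,
       (p1 (pvG xb) (PySem.List.pyRange 0 (xb.length : Int) 1) (PySem.List.pyRange 0 (xb.length : Int) 1) ([], [])).2)).1 := rfl
  have hB : xfill_alt xb = zfill ((PySem.List.pyRange 0 (xb.length : Int) 1).map (fun _ => List.replicate (xb.length : Int).toNat false))
      (((PySem.List.pyRange 0 (xb.length : Int) 1).filter (fun r =>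
          !(PySem.List.pyGetD ((PySem.List.pyRange 0 (xb.length : Int) 1).map (fun r =>
             (PySem.List.pyRange 0 (xb.length : Int) 1).any (fun c => pvG xb r c))) r false))).zip
       ((PySem.List.pyRange 0 (xb.length : Int) 1).filter (fun c =>
          !(PySem.List.pyGetD ((PySem.List.pyRange 0 (xb.length : Int) 1).map (fun c =>
             (PySem.List.pyRange 0 (xb.length : Int) 1).any (fun r => pvG xb r c))) c false)))) := rfl
  rw [hA, hB]
  rw [pv_p2_eq (PySem.List.pyRange 0 (xb.length : Int) 1) (PySem.List.nodup_pyRange_one 0 (xb.length : Int))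
      (PySem.List.pyRange 0 (xb.length : Int) 1) (PySem.List.nodup_pyRange_one 0 (xb.length : Int))]
  congr 1
  · congr 1
    · apply List.filter_congr
      intro r hr
      rcases PySem.List.mem_pyRange_one.mp hr with ⟨hr0, hrn⟩
      rw [PySem.List.pyGetD_map_pyRange_of_nonneg _ _ _ _ hr0 hrn]
      congr 1
      rw [pv_contains_eq]
      have hiff : r ∈ (p1 (pvG xb) (PySem.List.pyRange 0 (xb.length : Int) 1) (PySem.List.pyRange 0 (xb.length : Int) 1) ([], [])).1
          ↔ ((PySem.List.pyRange 0 (xb.length : Int) 1).any (fun c => pvG xb r c) = true) := by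
        rw [(pv_p1_mem (pvG xb) _ _ ([], []) r r).1]
        simp [List.any_eq_true, hr]
      cases hany : ((PySem.List.pyRange 0 (xb.length : Int) 1).any (fun c => pvG xb r c)) <;>
        simp [hiff, hany]
    · apply List.filter_congr
      intro c hcm
      rcases PySem.List.mem_pyRange_one.mp hcm with ⟨hc0, hcn⟩
      rw [PySem.List.pyGetD_map_pyRange_of_nonneg _ _ _ _ hc0 hcn]
      congr 1
      rw [pv_contains_eq]
      have hiff : c ∈ (p1 (pvG xb) (PySem.List.pyRange 0 (xb.length : Int) 1) (PySem.List.pyRange 0 (xb.length : Int) 1) ([], [])).2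
          ↔ ((PySem.List.pyRange 0 (xb.length : Int) 1).any (fun r => pvG xb r c) = true) := by
        rw [(pv_p1_mem (pvG xb) _ _ ([], []) c c).2]
        simp [List.any_eq_true, hcm]
      cases hany : ((PySem.List.pyRange 0 (xb.length : Int) 1).any (fun r => pvG xb r c)) <;>
        simp [hiff, hany]

-- ===== VERDICT (by name: the statement is the Claim_ definition above) =====
theorem xfill_spec : Claim_equal_xfill := by
  intro xboard _ _
  show xfill xboard = xfill_alt xboard
  exact xfill_eq xboard
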